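-- pv_equiv track=rewrite | github.com/lesleslie/mahavishnu | mahavishnu/core/pattern_detection.py | _categorize_blocker
-- ===== SOURCE A (Python) =====
-- def _categorize_blocker(keyword: str) -> str:
--     """Categorize blocker by keyword."""
--     categories = {
--         "dependency": ["dependency", "depends on", "requires"],
--         "resource": ["waiting", "need", "on hold"],
--         "technical": ["stuck", "cannot proceed", "blocked"],
--     }
--     for category, keywords in categories.items():
--         if keyword in keywords:
--             return category
--     return "unknown"
-- ===== SOURCE B (Python) =====
-- _KEYWORD_TO_CATEGORY = {
--     "dependency": "dependency",
--     "depends on": "dependency",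
--     "requires": "dependency",
--     "waiting": "resource",
--     "need": "resource",
--     "on hold": "resource",
--     "stuck": "technical",
--     "cannot proceed": "technical",
--     "blocked": "technical",
-- }
--
--
-- def _categorize_blocker(keyword: str) -> str:
--     """Categorize blocker by keyword via a prebuilt reverse index."""
--     return _KEYWORD_TO_CATEGORY.get(keyword, "unknown")
-- ===== Notes on version B (the rewrite author's own statement) =====
-- stated objective: simpler
-- what changed: Replaced the call-time loop over a category->keywords dict with list membership tests by a single prebuilt keyword->category reverse index consulted with one dict lookup and an 'unknown' default.
import Mathlib
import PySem

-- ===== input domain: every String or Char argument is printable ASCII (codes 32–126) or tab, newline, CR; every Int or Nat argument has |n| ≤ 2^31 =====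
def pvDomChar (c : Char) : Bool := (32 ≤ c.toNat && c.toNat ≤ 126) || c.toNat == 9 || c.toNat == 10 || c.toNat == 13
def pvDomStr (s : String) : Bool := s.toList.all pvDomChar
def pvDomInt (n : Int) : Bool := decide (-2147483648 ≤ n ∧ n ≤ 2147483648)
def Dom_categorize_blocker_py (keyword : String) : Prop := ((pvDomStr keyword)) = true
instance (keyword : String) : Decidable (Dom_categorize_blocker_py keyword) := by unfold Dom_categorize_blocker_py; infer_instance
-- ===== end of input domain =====

-- B replaces the per-call scan over categories by one lookup in a prebuilt keyword->category reverse index (simpler).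

-- ===== PORT A =====
-- loop over categories.items(): return the category whose keyword list contains keyword
def pvLoopA (keyword : String) : List (String × List String) → String
  | [] => "unknown"
  | (cat, kws) :: rest => if kws.contains keyword then cat else pvLoopA keyword rest

def categorize_blocker_py (keyword : String) : String :=
  let categories : List (String × List String) :=
    [("dependency", ["dependency", "depends on", "requires"]),
     ("resource", ["waiting", "need", "on hold"]),
     ("technical", ["stuck", "cannot proceed", "blocked"])]
  pvLoopA keyword categories

-- ===== PORT B =====
-- B: prebuilt reverse index keyword -> category, one lookup with default
def pvKeywordToCategory : PySem.Dict String String :=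
  PySem.Dict.mk
    [("dependency", "dependency"), ("depends on", "dependency"), ("requires", "dependency"),
     ("waiting", "resource"), ("need", "resource"), ("on hold", "resource"),
     ("stuck", "technical"), ("cannot proceed", "technical"), ("blocked", "technical")]

def categorize_blocker_py_alt (keyword : String) : String :=
  pvKeywordToCategory.getD keyword "unknown"

-- ===== PRECONDITION & SPEC =====
def Spec_categorize_blocker_py (keyword : String) (out : String) : Prop := out = categorize_blocker_py_alt keyword
instance (keyword : String) (out : String) : Decidable (Spec_categorize_blocker_py keyword out) := by unfold Spec_categorize_blocker_py; infer_instance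

-- ===== CLAIM (what is proved, stated in full; the proofs are below) =====
def Claim_equal_categorize_blocker_py : Prop := ∀ (keyword : String), Dom_categorize_blocker_py keyword → Spec_categorize_blocker_py keyword (categorize_blocker_py keyword)

-- ===== LEMMAS AND PROOFS =====

-- ===== VERDICT (by name: the statement is the Claim_ definition above) =====
theorem categorize_blocker_py_spec : Claim_equal_categorize_blocker_py := by
  intro k _
  unfold Spec_categorize_blocker_py categorize_blocker_py categorize_blocker_py_alt
    pvKeywordToCategory
  by_cases h1 : k = "dependency"
  · subst h1; decide
  by_cases h2 : k = "depends on"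
  · subst h2; decide
  by_cases h3 : k = "requires"
  · subst h3; decide
  by_cases h4 : k = "waiting"
  · subst h4; decide
  by_cases h5 : k = "need"
  · subst h5; decide
  by_cases h6 : k = "on hold"
  · subst h6; decide
  by_cases h7 : k = "stuck"
  · subst h7; decide
  by_cases h8 : k = "cannot proceed"
  · subst h8; decide
  by_cases h9 : k = "blocked"
  · subst h9; decide
  simp [pvLoopA, PySem.Dict.getD, PySem.Dict.get?, h1, h2, h3, h4, h5, h6, h7, h8, h9, Ne.symm h1, Ne.symm h2, Ne.symm h3, Ne.symm h4, Ne.symm h5, Ne.symm h6, Ne.symm h7, Ne.symm h8, Ne.symm h9]
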